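-- pv_equiv track=rewrite | github.com/GandhiNN/staros-scripts | ssd-getter/getSsd.py | get_node_user_pass
-- ===== SOURCE A (Python) =====
-- def get_node_user_pass(node_config, node_type):
--     node = []
--     ip_address = []
--     user = []
--     password = []
--     # populate lists
--     for item in node_config:
--         if item["nodetype"] == node_type:
--             node.append(item['nodename'])
--             ip_address.append(item['ip_address'])
--             user.append(item['user'])
--             password.append(item['password'])
--     return node, ip_address, user, password
-- ===== SOURCE B (Python) =====
-- def get_node_user_pass(node_config, node_type):
--     def column(key):
--         return [item[key] for item in node_config if item["nodetype"] == node_type]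
--     return column('nodename'), column('ip_address'), column('user'), column('password')
-- ===== Notes on version B (the rewrite author's own statement) =====
-- stated objective: alternative
-- what changed: B computes each of the four result lists with its own independent filtering pass over node_config (a column(key) helper called four times), instead of A's single pass maintaining four parallel accumulator lists.
import Mathlib
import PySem

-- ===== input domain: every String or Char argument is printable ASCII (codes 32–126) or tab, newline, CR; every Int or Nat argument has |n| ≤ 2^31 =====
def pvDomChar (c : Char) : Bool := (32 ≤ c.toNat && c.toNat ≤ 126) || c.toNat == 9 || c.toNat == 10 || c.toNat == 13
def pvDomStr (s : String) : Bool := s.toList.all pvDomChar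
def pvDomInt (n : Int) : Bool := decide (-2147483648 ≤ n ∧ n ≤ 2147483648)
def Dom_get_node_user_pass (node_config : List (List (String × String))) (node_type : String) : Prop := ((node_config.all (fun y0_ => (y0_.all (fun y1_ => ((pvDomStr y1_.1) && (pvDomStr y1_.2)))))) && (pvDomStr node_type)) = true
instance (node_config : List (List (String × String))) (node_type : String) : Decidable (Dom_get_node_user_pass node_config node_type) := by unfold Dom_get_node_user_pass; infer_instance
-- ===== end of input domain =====

-- B computes each result list in its own independent filtering pass (a column(key) helper called
-- four times) instead of A's single pass with four parallel accumulators; equal value, no speed claim.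

-- dict lookup item[k] (first match in the association list); "" stands in for the KeyError case,
-- which Pre_get_node_user_pass excludes (both Pythons raise there).
def pvLookup (item : List (String × String)) (k : String) : String :=
  ((item.find? (fun p => p.1 == k)).map (·.2)).getD ""

-- ===== PORT A =====
def get_node_user_pass (node_config : List (List (String × String))) (node_type : String) : List String × List String × List String × List String :=
  node_config.foldl
    (fun st item =>
      if pvLookup item "nodetype" == node_type then
        (st.1 ++ [pvLookup item "nodename"],
         st.2.1 ++ [pvLookup item "ip_address"],
         st.2.2.1 ++ [pvLookup item "user"],
         st.2.2.2 ++ [pvLookup item "password"])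
      else st)
    ([], [], [], [])

-- ===== PORT B =====
-- B's helper: one filtering comprehension per key
def pvColumn (node_config : List (List (String × String))) (node_type : String) (key : String) : List String :=
  node_config.filterMap
    (fun item => if pvLookup item "nodetype" == node_type then some (pvLookup item key) else none)

def get_node_user_pass_alt (node_config : List (List (String × String))) (node_type : String) : List String × List String × List String × List String :=
  (pvColumn node_config node_type "nodename",
   pvColumn node_config node_type "ip_address",
   pvColumn node_config node_type "user",
   pvColumn node_config node_type "password")

-- ===== PRECONDITION & SPEC =====
-- Pre_: every item carries the "nodetype" key, and each matching item carries the other three keys;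
-- on the excluded inputs both Pythons raise KeyError.
def Pre_get_node_user_pass (node_config : List (List (String × String))) (node_type : String) : Prop :=
  ∀ item ∈ node_config,
    (item.find? (fun p => p.1 == "nodetype")).isSome ∧
    (pvLookup item "nodetype" = node_type →
      (item.find? (fun p => p.1 == "nodename")).isSome ∧
      (item.find? (fun p => p.1 == "ip_address")).isSome ∧
      (item.find? (fun p => p.1 == "user")).isSome ∧
      (item.find? (fun p => p.1 == "password")).isSome)
instance (node_config : List (List (String × String))) (node_type : String) : Decidable (Pre_get_node_user_pass node_config node_type) := by unfold Pre_get_node_user_pass; infer_instance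

def pvWitness_get_node_user_pass : (List (List (String × String))) × String :=
  ([[("nodetype", "asr"), ("nodename", "n1"), ("ip_address", "10.0.0.1"), ("user", "u"), ("password", "p")],
    [("nodetype", "epdg")]], "asr")

def Spec_get_node_user_pass (node_config : List (List (String × String))) (node_type : String) (out : List String × List String × List String × List String) : Prop := out = get_node_user_pass_alt node_config node_type
instance (node_config : List (List (String × String))) (node_type : String) (out : List String × List String × List String × List String) : Decidable (Spec_get_node_user_pass node_config node_type out) := by unfold Spec_get_node_user_pass; infer_instance

-- ===== CLAIM =====
def Claim_equal_get_node_user_pass : Prop := ∀ (node_config : List (List (String × String))) (node_type : String), Dom_get_node_user_pass node_config node_type → Pre_get_node_user_pass node_config node_type → Spec_get_node_user_pass node_config node_type (get_node_user_pass node_config node_type)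

-- ===== LEMMAS AND PROOFS =====

-- A's foldl with four appending accumulators, started from (a,b,c,d), yields the four columns
-- appended to the accumulators.
theorem pv_fold_eq_columns (node_type : String) (l : List (List (String × String)))
    (a b c d : List String) :
    l.foldl
      (fun st item =>
        if pvLookup item "nodetype" == node_type then
          (st.1 ++ [pvLookup item "nodename"],
           st.2.1 ++ [pvLookup item "ip_address"],
           st.2.2.1 ++ [pvLookup item "user"],
           st.2.2.2 ++ [pvLookup item "password"])
        else st)
      (a, b, c, d) =
    (a ++ pvColumn l node_type "nodename",
     b ++ pvColumn l node_type "ip_address",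
     c ++ pvColumn l node_type "user",
     d ++ pvColumn l node_type "password") := by
  induction l generalizing a b c d with
  | nil => simp [pvColumn]
  | cons hd tl ih =>
    by_cases h : (pvLookup hd "nodetype" == node_type) = true
    · have h' : pvLookup hd "nodetype" = node_type := by simpa using h
      simp only [List.foldl_cons, h, if_pos, ih]
      simp [pvColumn, h', List.append_assoc]
    · have h' : ¬ pvLookup hd "nodetype" = node_type := by simpa using h
      simp only [List.foldl_cons, ih]
      simp [pvColumn, h, h']

-- ===== VERDICT =====
theorem get_node_user_pass_spec : Claim_equal_get_node_user_pass := by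
  intro node_config node_type _ _
  unfold Spec_get_node_user_pass get_node_user_pass get_node_user_pass_alt
  rw [pv_fold_eq_columns]
  simp
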